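-- pv_equiv track=rewrite | github.com/scrapy/scrapy | tutorial-env/lib/python3.9/site-packages/twisted/trial/reporter.py | _getPreludeSegments
-- ===== SOURCE A (Python) =====
-- def _getPreludeSegments(testID):
--     """
--     Return a list of all non-leaf segments to display in the tree.
--
--     Normally this is the module and class name.
--     """
--     segments = testID.split(".")[:-1]
--     if len(segments) == 0:
--         return segments
--     segments = [
--         seg for seg in (".".join(segments[:-1]), segments[-1]) if len(seg) > 0
--     ]
--     return segments
-- ===== SOURCE B (Python) =====
-- def _getPreludeSegments(testID):
--     """
--     Return a list of all non-leaf segments to display in the tree.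
--
--     Normally this is the module and class name.
--     """
--     i = testID.rfind(".")
--     if i == -1:
--         return []
--     j = testID.rfind(".", 0, i)
--     out = []
--     if j > 0:
--         out.append(testID[:j])
--     mid = testID[j + 1:i]
--     if mid:
--         out.append(mid)
--     return out
-- ===== Notes on version B (the rewrite author's own statement) =====
-- stated objective: alternative
-- what changed: Instead of splitting the whole string into a list of segments and re-joining a prefix, B locates the positions of the last two dot separators with rfind and slices the module prefix and class segment directly out of the string, never materialising a segment list or performing a join.
import Mathlib
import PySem

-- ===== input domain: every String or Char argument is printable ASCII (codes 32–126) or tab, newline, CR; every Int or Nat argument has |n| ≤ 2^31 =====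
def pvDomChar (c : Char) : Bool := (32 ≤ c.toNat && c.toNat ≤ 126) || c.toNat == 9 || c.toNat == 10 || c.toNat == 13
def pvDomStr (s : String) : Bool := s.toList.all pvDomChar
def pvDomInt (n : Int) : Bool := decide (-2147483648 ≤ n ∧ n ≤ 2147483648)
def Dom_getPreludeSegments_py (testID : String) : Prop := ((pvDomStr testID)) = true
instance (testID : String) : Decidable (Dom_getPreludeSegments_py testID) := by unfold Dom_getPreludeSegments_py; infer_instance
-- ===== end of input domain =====

-- B replaces A's split-into-segments-and-rejoin approach by locating the last two dot separator
-- positions with rfind and slicing the prefix and middle segment directly (objective: alternative).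


-- ===== PORT A =====
def getPreludeSegments_py (testID : String) : List String :=
  -- segments = testID.split(".")[:-1]   (sep "." is nonempty, so split? is `some`)
  let segments := PySem.List.slice ((PySem.Str.split? testID ".").getD []) none (some (-1))
  if segments.length = 0 then segments
  else
    -- [seg for seg in (".".join(segments[:-1]), segments[-1]) if len(seg) > 0]
    let joined := PySem.Str.join "." (PySem.List.slice segments none (some (-1)))
    let last := (PySem.List.pyGet? segments (-1)).getD ""   -- in range: segments ≠ []
    ([joined, last]).filter (fun seg => decide ((0 : Int) < PySem.Str.len seg))

-- ===== PORT B =====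
def getPreludeSegments_py_alt (testID : String) : List String :=
  let cs := testID.toList
  let i := PySem.Chars.rfind cs ['.']                       -- i = testID.rfind(".")
  if i = -1 then []
  else
    let j := PySem.Chars.rfindFrom cs ['.'] 0 (some i)      -- j = testID.rfind(".", 0, i)
    let out : List String :=
      if 0 < j then [String.ofList (PySem.Chars.slice cs none (some j))] else []   -- testID[:j]
    let mid := String.ofList (PySem.Chars.slice cs (some (j + 1)) (some i))        -- testID[j+1:i]
    if mid ≠ "" then out ++ [mid] else out

-- ===== PRECONDITION & SPEC =====
def Spec_getPreludeSegments_py (testID : String) (out : List String) : Prop := out = getPreludeSegments_py_alt testID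
instance (testID : String) (out : List String) : Decidable (Spec_getPreludeSegments_py testID out) := by unfold Spec_getPreludeSegments_py; infer_instance

-- ===== CLAIM (what is proved, stated in full; the proofs are below) =====
def Claim_equal_getPreludeSegments_py : Prop := ∀ (testID : String), Dom_getPreludeSegments_py testID → Spec_getPreludeSegments_py testID (getPreludeSegments_py testID)

-- ===== LEMMAS AND PROOFS =====

-- simple left-to-right splitter on '.', trailing accumulator reversed; reference model for port A
def mySplitAux : List Char → List Char → List (List Char)
  | [], cur => [cur.reverse]
  | c :: rest, cur => if c = '.' then cur.reverse :: mySplitAux rest [] else mySplitAux rest (c :: cur)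

def mySplit (l : List Char) : List (List Char) := mySplitAux l []

theorem splitOn_go_eq (fuel : Nat) :
    ∀ (l cur : List Char) (acc : List (List Char)), l.length < fuel →
      PySem.Chars.splitOn.go ['.'] fuel l cur acc = acc.reverse ++ mySplitAux l cur := by
  induction fuel with
  | zero => intro l cur acc h; omega
  | succ f ih =>
    intro l cur acc h
    cases l with
    | nil => simp [PySem.Chars.splitOn.go, mySplitAux]
    | cons c rest =>
      rw [PySem.Chars.splitOn.go]
      by_cases hc : c = '.'
      · subst hc
        rw [if_pos (by simp [List.isPrefixOf] : (['.'].isPrefixOf ('.' :: rest)) = true)]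
        simp only [List.length_cons] at h
        rw [show List.drop ['.'].length ('.' :: rest) = rest from rfl]
        rw [ih rest [] (cur.reverse :: acc) (by omega)]
        simp [mySplitAux]
      · have hpf : (['.'].isPrefixOf (c :: rest)) = false := by
          simp [List.isPrefixOf]
          exact Ne.symm hc
        rw [hpf]
        simp only [Bool.false_eq_true, if_false, mySplitAux, if_neg hc]
        simp only [List.length_cons] at h
        exact ih rest (c :: cur) acc (by omega)

theorem splitOn_eq_mySplit (cs : List Char) :
    PySem.Chars.splitOn cs ['.'] = mySplit cs := by
  unfold PySem.Chars.splitOn mySplit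
  simpa using splitOn_go_eq (cs.length + 1) cs [] [] (by omega)

theorem mySplitAux_ne_nil (l cur : List Char) : mySplitAux l cur ≠ [] := by
  induction l generalizing cur with
  | nil => simp [mySplitAux]
  | cons c rest ih =>
    by_cases hc : c = '.' <;> simp [mySplitAux, hc, ih]

theorem mySplitAux_nodot (l : List Char) (h : '.' ∉ l) :
    ∀ cur, mySplitAux l cur = [cur.reverse ++ l] := by
  induction l with
  | nil => intro cur; simp [mySplitAux]
  | cons c rest ih =>
    intro cur
    have hc : c ≠ '.' := fun hc => h (hc ▸ List.mem_cons_self)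
    have hr : '.' ∉ rest := fun hr => h (List.mem_cons_of_mem _ hr)
    simp [mySplitAux, hc, ih hr]

theorem mySplitAux_append_dot (v : List Char) (hv : '.' ∉ v) :
    ∀ (u cur : List Char), mySplitAux (u ++ '.' :: v) cur = mySplitAux u cur ++ [v] := by
  intro u
  induction u with
  | nil => intro cur; simp [mySplitAux, mySplitAux_nodot v hv]
  | cons c rest ih =>
    intro cur
    by_cases hc : c = '.' <;> simp [mySplitAux, hc, ih]

theorem intercalate_cons₂ (sep x y : List Char) (l : List (List Char)) :
    sep.intercalate (x :: y :: l) = x ++ sep ++ sep.intercalate (y :: l) := by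
  simp [List.intercalate]

theorem intercalate_mySplitAux (l : List Char) :
    ∀ cur, ['.'].intercalate (mySplitAux l cur) = cur.reverse ++ l := by
  induction l with
  | nil => intro cur; simp [mySplitAux, List.intercalate]
  | cons c rest ih =>
    intro cur
    by_cases hc : c = '.'
    · subst hc
      obtain ⟨hd, t, ht⟩ : ∃ hd t, mySplitAux rest [] = hd :: t := by
        cases hh : mySplitAux rest [] with
        | nil => exact absurd hh (mySplitAux_ne_nil rest [])
        | cons hd t => exact ⟨hd, t, rfl⟩
      rw [show mySplitAux ('.' :: rest) cur = cur.reverse :: mySplitAux rest [] from by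
        simp [mySplitAux]]
      rw [ht, intercalate_cons₂]
      have := ih ([] : List Char)
      rw [ht] at this
      simp only [List.reverse_nil, List.nil_append] at this
      simp [this]
    · simp only [mySplitAux, if_neg hc, ih (c :: cur)]
      simp

theorem mySplit_singleton_of_nodot {s : List Char} (h : '.' ∉ s) : mySplit s = [s] := by
  unfold mySplit; simpa using mySplitAux_nodot s h []

theorem intercalate_mySplit (s : List Char) : ['.'].intercalate (mySplit s) = s := by
  simpa using intercalate_mySplitAux s []

-- ----- rfind characterisation (for port B) -----

theorem prefix_dot_iff (t : List Char) :
    (['.'].isPrefixOf t = true) ↔ ∃ r, t = '.' :: r := by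
  cases t with
  | nil => simp [List.isPrefixOf]
  | cons c r =>
    constructor
    · intro h
      simp [List.isPrefixOf] at h
      exact ⟨r, by rw [h]⟩
    · rintro ⟨r', hr⟩
      cases hr
      simp [List.isPrefixOf]

theorem rfind_go_zero (s : List Char) :
    PySem.Chars.rfind.go s ['.'] 0 = if ['.'].isPrefixOf s then 0 else -1 := rfl

theorem rfind_go_succ (s : List Char) (k : Nat) :
    PySem.Chars.rfind.go s ['.'] (k + 1) =
      if ['.'].isPrefixOf (s.drop (k + 1)) then ((k + 1 : Nat) : Int)
      else PySem.Chars.rfind.go s ['.'] k := rfl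

theorem rfind_go_nodot (s : List Char) (h : '.' ∉ s) :
    ∀ k, PySem.Chars.rfind.go s ['.'] k = -1 := by
  intro k
  induction k with
  | zero =>
    rw [rfind_go_zero, if_neg]
    intro hp
    obtain ⟨r, hr⟩ := (prefix_dot_iff s).mp hp
    exact h (hr ▸ List.mem_cons_self)
  | succ k ih =>
    rw [rfind_go_succ, if_neg, ih]
    intro hp
    obtain ⟨r, hr⟩ := (prefix_dot_iff _).mp hp
    exact h (List.mem_of_mem_drop (hr ▸ List.mem_cons_self))

theorem rfind_go_last (l q : List Char) (hq : '.' ∉ q) :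
    ∀ k, l.length ≤ k → PySem.Chars.rfind.go (l ++ '.' :: q) ['.'] k = l.length := by
  intro k
  induction k with
  | zero =>
    intro hk
    have hl : l = [] := List.length_eq_zero_iff.mp (by omega)
    subst hl
    rw [rfind_go_zero, if_pos ((prefix_dot_iff _).mpr ⟨q, by simp⟩)]
    simp
  | succ k ih =>
    intro hk
    rcases Nat.lt_or_ge l.length (k + 1) with hlt | hge
    · have hdrop : (l ++ '.' :: q).drop (k + 1) = q.drop (k - l.length) := by
        have h1 : k + 1 = l.length + (k + 1 - l.length) := by omega
        rw [h1, ← List.drop_drop, List.drop_left]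
        have h2 : k + 1 - l.length = (k - l.length) + 1 := by omega
        rw [h2]
        simp [List.drop_succ_cons]
      rw [rfind_go_succ, hdrop, if_neg, ih (by omega)]
      intro hp
      obtain ⟨r, hr⟩ := (prefix_dot_iff _).mp hp
      exact hq (List.mem_of_mem_drop (hr ▸ List.mem_cons_self))
    · have heq : l.length = k + 1 := by omega
      rw [rfind_go_succ, ← heq, List.drop_left, if_pos ((prefix_dot_iff _).mpr ⟨q, rfl⟩)]

theorem rfind_last (l q : List Char) (hq : '.' ∉ q) :
    PySem.Chars.rfind (l ++ '.' :: q) ['.'] = l.length := by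
  unfold PySem.Chars.rfind
  exact rfind_go_last l q hq _ (by simp)

theorem rfind_nodot (s : List Char) (h : '.' ∉ s) :
    PySem.Chars.rfind s ['.'] = -1 := by
  unfold PySem.Chars.rfind
  exact rfind_go_nodot s h _

theorem rfindFrom_zero_some (cs : List Char) (i : Nat) (hi : i ≤ cs.length) :
    PySem.Chars.rfindFrom cs ['.'] 0 (some (i : Int)) =
      (if PySem.Chars.rfind (cs.take i) ['.'] = -1 then -1
       else PySem.Chars.rfind (cs.take i) ['.']) := by
  unfold PySem.Chars.rfindFrom
  have h1 : ¬ ((cs.length : Int) < (i : Int)) := by exact_mod_cast Nat.not_lt.mpr hi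
  have h2 : ¬ ((i : Int) < 0) := by omega
  simp only [if_neg h1, if_neg h2, lt_irrefl, if_false]
  simp [Int.toNat_natCast]

-- last-occurrence decomposition
theorem exists_last_dot (cs : List Char) (h : '.' ∈ cs) :
    ∃ l q, cs = l ++ '.' :: q ∧ '.' ∉ q := by
  induction cs with
  | nil => cases h
  | cons c rest ih =>
    by_cases hr : '.' ∈ rest
    · obtain ⟨l, q, hlq, hq⟩ := ih hr
      exact ⟨c :: l, q, by rw [hlq]; rfl, hq⟩
    · have hc : c = '.' := by
        rcases List.mem_cons.mp h with h' | h'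
        · exact h'.symm
        · exact absurd h' hr
      exact ⟨[], rest, by rw [hc]; rfl, hr⟩

theorem filter_pred_eq (s : String) :
    (decide ((0 : Int) < PySem.Str.len s)) = (s != "") := by
  rw [PySem.Str.len_eq_length]
  by_cases h : s = ""
  · subst h; simp
  · have hp : 0 < s.length := by
      cases hs : s.toList with
      | nil => exact absurd (String.toList_eq_nil_iff.mp hs) h
      | cons c t =>
        have := String.length_toList (s := s)
        rw [hs] at this
        simp only [List.length_cons] at this
        omega
    have hip : ((0 : Int) < (s.length : Int)) := by exact_mod_cast hp
    simp [h, hp]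

theorem ofList_ne_empty_iff (l : List Char) : (String.ofList l ≠ "") ↔ l ≠ [] := by
  cases l <;> simp

theorem ofList_ne_empty (l : List Char) : (String.ofList l != "") = !l.isEmpty := by
  cases l <;> simp

theorem join_map_ofList (l : List (List Char)) :
    PySem.Str.join "." (l.map String.ofList) = String.ofList (['.'].intercalate l) := by
  unfold PySem.Str.join PySem.Chars.join
  congr 1
  have hm : List.map String.toList (List.map String.ofList l) = l := by
    rw [List.map_map, show String.toList ∘ String.ofList = id from
      funext fun x => String.toList_ofList, List.map_id]
  rw [hm, show ".".toList = ['.'] from rfl]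

-- ===== VERDICT (by name: the statement is the Claim_ definition above) =====
theorem getPreludeSegments_py_spec : Claim_equal_getPreludeSegments_py := by
  intro testID _
  unfold Spec_getPreludeSegments_py getPreludeSegments_py getPreludeSegments_py_alt
  set cs := testID.toList with hcs
  have hsplit : PySem.Str.split? testID "." = some ((mySplit cs).map String.ofList) := by
    unfold PySem.Str.split? PySem.Chars.split?
    rw [show ".".toList = ['.'] from rfl]
    simp [splitOn_eq_mySplit, hcs]
  rw [hsplit]
  simp only [Option.getD_some, PySem.List.slice_to_neg_one]
  by_cases hdot : '.' ∈ cs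
  · obtain ⟨l, q, hlq, hq⟩ := exists_last_dot cs hdot
    have hms : mySplit cs = mySplit l ++ [q] := by
      rw [hlq]; unfold mySplit; exact mySplitAux_append_dot q hq l []
    have hrf : PySem.Chars.rfind cs ['.'] = (l.length : Int) := by
      rw [hlq]; exact rfind_last l q hq
    have hine : ((l.length : Int)) ≠ -1 := by omega
    rw [hrf, if_neg hine]
    have hlen : l.length ≤ cs.length := by rw [hlq]; simp
    rw [rfindFrom_zero_some cs l.length hlen]
    have htake : cs.take l.length = l := by rw [hlq]; exact List.take_left
    -- A-side shared pieces
    have hsegdl : ((mySplit cs).map String.ofList).dropLast = (mySplit l).map String.ofList := by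
      rw [hms, List.map_append]; simp
    rw [hsegdl]
    have hlne : mySplit l ≠ [] := mySplitAux_ne_nil l []
    rw [if_neg (by simpa using hlne)]
    by_cases hdotl : '.' ∈ l
    · -- two dots at least: l = u ++ '.' :: p
      obtain ⟨u, p, hup, hp⟩ := exists_last_dot l hdotl
      have hmsl : mySplit l = mySplit u ++ [p] := by
        rw [hup]; unfold mySplit; exact mySplitAux_append_dot p hp u []
      have hrfl : PySem.Chars.rfind (cs.take l.length) ['.'] = (u.length : Int) := by
        rw [htake, hup]; exact rfind_last u p hp
      rw [hrfl, if_neg (by omega : (u.length : Int) ≠ -1)]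
      -- A: joined and last
      have hdl2 : ((mySplit u ++ [p]).map String.ofList).dropLast = (mySplit u).map String.ofList := by
        rw [List.map_append]; simp
      have hlast : PySem.List.pyGet? ((mySplit u ++ [p]).map String.ofList) (-1)
          = some (String.ofList p) := by
        rw [PySem.List.pyGet?_neg_one]
        simp
      rw [hmsl]
      simp only [hdl2, hlast, Option.getD_some]
      rw [join_map_ofList, intercalate_mySplit]
      -- B: slices
      have hslice1 : PySem.Chars.slice cs none (some (u.length : Int)) = u := by
        rw [PySem.Chars.slice_eq_listSlice, PySem.List.slice_to_natCast, hlq, hup]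
        rw [show (u ++ '.' :: p) ++ '.' :: q = u ++ ('.' :: p ++ '.' :: q) by simp]
        exact List.take_left
      have hceq : cs = u ++ '.' :: (p ++ '.' :: q) := by
        rw [hlq, hup]; simp
      have hslice2 : PySem.Chars.slice cs (some ((u.length : Int) + 1)) (some (l.length : Int)) = p := by
        rw [show ((u.length : Int) + 1) = ((u.length + 1 : Nat) : Int) by push_cast; ring]
        rw [PySem.Chars.slice_eq_listSlice, PySem.List.slice_natCast]
        rw [hceq, show u ++ '.' :: (p ++ '.' :: q) = (u ++ ['.']) ++ (p ++ '.' :: q) by simp]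
        rw [show u.length + 1 = (u ++ ['.']).length by simp, List.drop_left]
        have hlp : l.length - (u ++ ['.']).length = p.length := by
          rw [hup]; simp only [List.length_append, List.length_cons, List.length_nil]; omega
        rw [hlp, List.take_left]
      rw [hslice1, hslice2]
      -- both sides are now filters of the literal pair [ofList u, ofList p]
      have hpred := funext filter_pred_eq
      rw [hpred]
      by_cases hu : u = []
      · subst hu
        simp only [List.length_nil, Nat.cast_zero, lt_irrefl, if_false]
        by_cases hpp : p = []
        · subst hpp; simp [List.filter]
        · have hpb : (String.ofList p != "") = true := by
            simp [ofList_ne_empty, hpp]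
          simp [List.filter, hpb, (ofList_ne_empty_iff p).mpr hpp]
      · have hul : (0 : Int) < u.length := by
          have := List.length_pos_iff.mpr hu; exact_mod_cast this
        rw [if_pos hul]
        have hub : (String.ofList u != "") = true := by
          simp [ofList_ne_empty, hu]
        by_cases hpp : p = []
        · subst hpp
          simp [List.filter, hub]
        · have hpb : (String.ofList p != "") = true := by
            simp [ofList_ne_empty, hpp]
          simp [List.filter, hub, hpb, (ofList_ne_empty_iff p).mpr hpp]
    · -- exactly one dot: l is dot-free
      have hmsl : mySplit l = [l] := mySplit_singleton_of_nodot hdotl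
      have hrfl : PySem.Chars.rfind (cs.take l.length) ['.'] = -1 := by
        rw [htake]; exact rfind_nodot l hdotl
      rw [hrfl, if_pos rfl]
      rw [hmsl]
      have hslice : PySem.Chars.slice cs (some ((-1 : Int) + 1)) (some (l.length : Int)) = l := by
        rw [show ((-1 : Int) + 1) = ((0 : Nat) : Int) by norm_num]
        rw [PySem.Chars.slice_eq_listSlice, PySem.List.slice_natCast]
        simpa using htake
      simp only [List.map_cons, List.map_nil]
      rw [show ([String.ofList l]).dropLast = ([] : List String) from rfl]
      rw [show PySem.List.pyGet? [String.ofList l] (-1) = some (String.ofList l) from by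
        rw [PySem.List.pyGet?_neg_one]; simp]
      simp only [Option.getD_some]
      rw [show PySem.Str.join "." ([] : List String) = String.ofList (['.'].intercalate []) from
        join_map_ofList []]
      have hpred := funext filter_pred_eq
      rw [hpred, hslice]
      rw [if_neg (by norm_num : ¬ (0 : Int) < -1)]
      by_cases hl : l = []
      · subst hl; simp [List.filter, List.intercalate]
      · have hlb : (String.ofList l != "") = true := by
          simp [ofList_ne_empty, hl]
        simp [List.filter, hlb, (ofList_ne_empty_iff l).mpr hl, List.intercalate]
  · -- no dot at all: A returns [] (segments empty), B returns [] (rfind = -1)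
    rw [rfind_nodot cs hdot, if_pos rfl]
    rw [mySplit_singleton_of_nodot hdot]
    simp
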